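-- pv_equiv track=rewrite | github.com/amsoroya-sketch/irStudy | ICRP_Program_Resources/Flashcards/extract_flashcards.py | balance_categories
-- ===== SOURCE A (Python) =====
-- from typing import List, Dict, Tuple
--
-- def deduplicate_cards(cards: List[Dict]) -> List[Dict]:
--     """Remove duplicate flashcards based on back content"""
--     seen = set()
--     unique_cards = []
--
--     for card in cards:
--         # Use back content as unique identifier
--         identifier = card['back'].lower().strip()
--         if identifier not in seen:
--             seen.add(identifier)
--             unique_cards.append(card)
--
--     return unique_cards
--
-- def balance_categories(all_cards: Dict, targets: Dict) -> Dict: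
--     """Balance flashcard counts to meet target numbers"""
--     balanced = {}
--
--     for category, target in targets.items():
--         cards = all_cards[category]
--         # Deduplicate
--         cards = deduplicate_cards(cards)
--
--         # Sample to target (or keep all if less than target)
--         if len(cards) > target:
--             # Prioritize high difficulty and diverse sources
--             cards.sort(key=lambda x: (x.get('difficulty', 'medium'), x.get('source', '')))
--             balanced[category] = cards[:target]
--         else:
--             balanced[category] = cards
--
--     return balanced
-- ===== SOURCE B (Python) =====
-- def _key(card):
--     return (card.get('difficulty', 'medium'), card.get('source', ''))
--
-- def _key_lt(a, b):
--     return a[0] < b[0] or (a[0] == b[0] and a[1] < b[1])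
--
-- def _insert_sorted(best, card):
--     # stable insert: place card before the first strictly greater entry
--     if not best or _key_lt(_key(card), _key(best[0])):
--         return [card] + best
--     return [best[0]] + _insert_sorted(best[1:], card)
--
-- def balance_categories(all_cards, targets):
--     """Balance flashcard counts: one fused pass per category that deduplicates and
--     maintains a bounded, stably sorted buffer of the `target` best cards (online
--     partial selection) instead of deduplicating, fully sorting and slicing."""
--     balanced = {}
--     for category, target in targets.items():
--         seen = set()
--         uniq = []
--         best = []  # at most `target` cards, stably sorted by (difficulty, source)
--         for card in all_cards[category]:
--             ident = card['back'].lower().strip()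
--             if ident in seen:
--                 continue
--             seen.add(ident)
--             uniq.append(card)
--             best = _insert_sorted(best, card)[:target]
--         balanced[category] = best if len(uniq) > target else uniq
--     return balanced
-- ===== Notes on version B (the rewrite author's own statement) =====
-- stated objective: alternative
-- what changed: Per category, A deduplicates into a list, then fully sorts it in place and slices; B makes one fused pass that deduplicates and simultaneously maintains a bounded, stably sorted buffer of at most `target` cards via stable insertion (online partial selection), so cards beyond the target are never sorted.
import Mathlib
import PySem

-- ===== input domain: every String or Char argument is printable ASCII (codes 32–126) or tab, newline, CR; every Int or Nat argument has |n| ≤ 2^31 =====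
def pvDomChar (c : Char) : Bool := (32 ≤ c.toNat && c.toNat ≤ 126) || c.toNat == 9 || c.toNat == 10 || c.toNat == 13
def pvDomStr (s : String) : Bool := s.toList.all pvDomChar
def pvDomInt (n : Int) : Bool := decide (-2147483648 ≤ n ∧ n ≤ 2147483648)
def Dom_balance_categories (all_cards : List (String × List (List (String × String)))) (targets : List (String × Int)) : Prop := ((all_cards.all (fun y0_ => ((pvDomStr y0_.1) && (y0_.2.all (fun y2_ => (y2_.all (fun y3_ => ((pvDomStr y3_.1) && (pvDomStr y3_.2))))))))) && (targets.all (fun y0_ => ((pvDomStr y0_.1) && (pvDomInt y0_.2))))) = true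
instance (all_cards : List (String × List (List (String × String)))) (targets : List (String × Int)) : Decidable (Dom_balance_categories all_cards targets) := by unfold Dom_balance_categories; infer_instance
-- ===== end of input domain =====

-- B replaces A's dedup-then-full-sort-then-slice per category with ONE fused pass that
-- deduplicates and maintains a bounded, stably sorted buffer of at most `target` cards
-- (online partial selection by stable insertion); the cards beyond the target are never
-- sorted (objective: alternative).
-- Cards / the two dict arguments are Python dicts, encoded as association lists (lookup = first match).

-- shared primitives (both Pythons contain the identical expressions)
-- card.get(k) / card[k]: first-match association-list lookup
def pvLookup (card : List (String × String)) (k : String) : Option String :=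
  List.lookup k card
-- card['back'].lower().strip()  (Pre_ guarantees 'back' is present)
def pvIdent (card : List (String × String)) : String :=
  PySem.Str.strip (PySem.Str.lower ((pvLookup card "back").getD ""))
-- x.get('difficulty', 'medium') and x.get('source', '')
def pvKey1 (card : List (String × String)) : String := (pvLookup card "difficulty").getD "medium"
def pvKey2 (card : List (String × String)) : String := (pvLookup card "source").getD ""

-- ===== PORT A =====
def deduplicate_cards (cards : List (List (String × String))) : List (List (String × String)) :=
  (cards.foldl
    (fun (st : PySem.Set String × List (List (String × String))) card =>
      let identifier := pvIdent card
      if PySem.Set.contains st.1 identifier then st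
      else (PySem.Set.add st.1 identifier, st.2 ++ [card]))
    (PySem.Set.empty, [])).2

def balance_categories (all_cards : List (String × List (List (String × String)))) (targets : List (String × Int)) : List (String × List (List (String × String))) :=
  (targets.foldl
    (fun (balanced : PySem.Dict String (List (List (String × String)))) ct =>
      let cards := (List.lookup ct.1 all_cards).getD []   -- all_cards[category]; Pre_ guarantees the key exists
      let cards := deduplicate_cards cards
      if (cards.length : Int) > ct.2 then
        balanced.insert ct.1
          (PySem.List.slice (PySem.List.sorted2 cards pvKey1 pvKey2 false) none (some ct.2))
      else balanced.insert ct.1 cards)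
    PySem.Dict.empty).items

-- ===== PORT B =====
-- _key_lt: Python's tuple comparison (a0, a1) < (b0, b1), written out
def pvKeyLt (a b : String × String) : Bool :=
  decide (a.1 < b.1) || (a.1 == b.1 && decide (a.2 < b.2))
-- _key_lt(_key(a), _key(b))
def pvCardLt (a b : List (String × String)) : Bool :=
  pvKeyLt (pvKey1 a, pvKey2 a) (pvKey1 b, pvKey2 b)
-- _insert_sorted: stable insert before the first strictly greater entry; its recursion
-- is exactly PySem.List.insertBy with the comparator above
def pvInsertSorted (best : List (List (String × String))) (card : List (String × String)) : List (List (String × String)) :=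
  PySem.List.insertBy pvCardLt card best

def balance_categories_alt (all_cards : List (String × List (List (String × String)))) (targets : List (String × Int)) : List (String × List (List (String × String))) :=
  (targets.foldl
    (fun (balanced : PySem.Dict String (List (List (String × String)))) ct =>
      let st := ((List.lookup ct.1 all_cards).getD []).foldl
        (fun (s : PySem.Set String × List (List (String × String)) × List (List (String × String))) card =>
          let ident := pvIdent card
          if PySem.Set.contains s.1 ident then s
          else (PySem.Set.add s.1 ident, s.2.1 ++ [card],
                PySem.List.slice (pvInsertSorted s.2.2 card) none (some ct.2)))
        (PySem.Set.empty, [], [])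
      balanced.insert ct.1 (if (st.2.1.length : Int) > ct.2 then st.2.2 else st.2.1))
    PySem.Dict.empty).items

-- ===== PRECONDITION & SPEC =====
-- Pre_ excludes (a) inputs where the Python raises KeyError — a category of targets missing from
-- all_cards, or a card without a 'back' key; (b) association lists with duplicate keys, which do
-- not represent Python dicts (a Python dict cannot carry duplicate keys); and (c) negative
-- targets, which are outside the natural domain of a sampling count (on them A's slice
-- wraparound drops |target| cards from the end of the sorted list).
def Pre_balance_categories (all_cards : List (String × List (List (String × String)))) (targets : List (String × Int)) : Prop :=
  (targets.map Prod.fst).Nodup ∧ (all_cards.map Prod.fst).Nodup ∧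
  (∀ e ∈ all_cards, ∀ card ∈ e.2, (card.map Prod.fst).Nodup) ∧
  (∀ ct ∈ targets, 0 ≤ ct.2) ∧
  ∀ ct ∈ targets, ∃ cards, List.lookup ct.1 all_cards = some cards ∧
    ∀ card ∈ cards, (List.lookup "back" card).isSome
instance (all_cards : List (String × List (List (String × String)))) (targets : List (String × Int)) : Decidable (Pre_balance_categories all_cards targets) := by unfold Pre_balance_categories; infer_instance

def pvWitness_balance_categories : (List (String × List (List (String × String)))) × (List (String × Int)) :=
  ([("ir", [[("back", "Dose"), ("difficulty", "hard")], [("back", "dose ")], [("back", "Unit"), ("source", "icrp")]]), ("hp", [])],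
   [("ir", 1), ("hp", 3)])

def Spec_balance_categories (all_cards : List (String × List (List (String × String)))) (targets : List (String × Int)) (out : List (String × List (List (String × String)))) : Prop := out = balance_categories_alt all_cards targets
instance (all_cards : List (String × List (List (String × String)))) (targets : List (String × Int)) (out : List (String × List (List (String × String)))) : Decidable (Spec_balance_categories all_cards targets out) := by unfold Spec_balance_categories; infer_instance

-- ===== CLAIM (what is proved, stated in full; the proofs are below) =====
def Claim_equal_balance_categories : Prop := ∀ (all_cards : List (String × List (List (String × String)))) (targets : List (String × Int)), Dom_balance_categories all_cards targets → Pre_balance_categories all_cards targets → Spec_balance_categories all_cards targets (balance_categories all_cards targets)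

-- ===== LEMMAS AND PROOFS =====

-- taking n of a stable insert into a truncated list = taking n of the insert into the full list
lemma take_insertBy_take {α : Type} (lt : α → α → Bool) (x : α) (l : List α) (n : Nat) :
    (PySem.List.insertBy lt x (l.take n)).take n = (PySem.List.insertBy lt x l).take n := by
  induction l generalizing n with
  | nil => simp
  | cons y ys ih =>
    cases n with
    | zero => simp
    | succ m =>
      simp only [List.take_succ_cons, PySem.List.insertBy]
      by_cases h : lt x y = true
      · simp only [h, if_true, List.take_succ_cons]
        congr 1
        cases m with
        | zero => simp
        | succ k => simp [List.take_take]
      · simp only [h, Bool.false_eq_true, if_false, List.take_succ_cons]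
        rw [ih m]

-- B's comparator is exactly the one PySem.List.sorted2 folds with
lemma cardLt_eq :
    (fun a b => decide (pvKey1 a < pvKey1 b) || (!decide (pvKey1 b < pvKey1 a) && decide (pvKey2 a < pvKey2 b)))
      = pvCardLt := by
  funext a b
  unfold pvCardLt pvKeyLt
  rcases lt_trichotomy (pvKey1 a) (pvKey1 b) with h | h | h
  · simp [h, lt_asymm h]
  · simp [h]
  · simp [h, lt_asymm h, ne_of_gt h]

-- accumulating stable inserts over a list is sorting it (PySem.List.sorted2 is that fold)
lemma fold_ins_eq_sorted2 (uniq : List (List (String × String))) :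
    uniq.foldl (fun best card => PySem.List.insertBy pvCardLt card best) []
      = PySem.List.sorted2 uniq pvKey1 pvKey2 false := by
  simp only [PySem.List.sorted2, if_neg (by decide : ¬ (false = true))]
  rw [cardLt_eq]

-- the fused pass: its (seen, uniq) components are A's dedup fold, and its buffer is
-- the truncated sort of the uniq component
lemma fused_inv (cards : List (List (String × String))) (seen : PySem.Set String)
    (uniq : List (List (String × String))) (n : Nat) :
    cards.foldl
      (fun (s : PySem.Set String × List (List (String × String)) × List (List (String × String))) card =>
        let ident := pvIdent card
        if PySem.Set.contains s.1 ident then s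
        else (PySem.Set.add s.1 ident, s.2.1 ++ [card],
              (PySem.List.insertBy pvCardLt card s.2.2).take n))
      (seen, uniq, (uniq.foldl (fun best card => PySem.List.insertBy pvCardLt card best) []).take n)
    = (let r := cards.foldl
        (fun (st : PySem.Set String × List (List (String × String))) card =>
          let identifier := pvIdent card
          if PySem.Set.contains st.1 identifier then st
          else (PySem.Set.add st.1 identifier, st.2 ++ [card]))
        (seen, uniq)
       (r.1, r.2, (r.2.foldl (fun best card => PySem.List.insertBy pvCardLt card best) []).take n)) := by
  induction cards generalizing seen uniq with
  | nil => rfl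
  | cons card rest ih =>
    simp only [List.foldl_cons]
    by_cases h : PySem.Set.contains seen (pvIdent card) = true
    · simp only [h, if_true]
      exact ih seen uniq
    · simp only [h]
      have hbuf : (PySem.List.insertBy pvCardLt card
            ((uniq.foldl (fun best card => PySem.List.insertBy pvCardLt card best) []).take n)).take n
          = ((uniq ++ [card]).foldl (fun best card => PySem.List.insertBy pvCardLt card best) []).take n := by
        rw [take_insertBy_take, List.foldl_append]
        rfl
      rw [hbuf]
      exact ih (PySem.Set.add seen (pvIdent card)) (uniq ++ [card])

-- per category: A's dedup / sort / slice equals B's fused bounded pass (for a 0 ≤ target)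
lemma category_eq (cards : List (List (String × String))) (t : Int) (ht : 0 ≤ t) :
    (let st := cards.foldl
        (fun (s : PySem.Set String × List (List (String × String)) × List (List (String × String))) card =>
          let ident := pvIdent card
          if PySem.Set.contains s.1 ident then s
          else (PySem.Set.add s.1 ident, s.2.1 ++ [card],
                PySem.List.slice (pvInsertSorted s.2.2 card) none (some t)))
        (PySem.Set.empty, [], [])
     if (st.2.1.length : Int) > t then st.2.2 else st.2.1)
    = (let c := deduplicate_cards cards
       if (c.length : Int) > t then
         PySem.List.slice (PySem.List.sorted2 c pvKey1 pvKey2 false) none (some t)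
       else c) := by
  have hstep : (fun (s : PySem.Set String × List (List (String × String)) × List (List (String × String))) card =>
        let ident := pvIdent card
        if PySem.Set.contains s.1 ident then s
        else (PySem.Set.add s.1 ident, s.2.1 ++ [card],
              PySem.List.slice (pvInsertSorted s.2.2 card) none (some t)))
      = (fun (s : PySem.Set String × List (List (String × String)) × List (List (String × String))) card =>
        let ident := pvIdent card
        if PySem.Set.contains s.1 ident then s
        else (PySem.Set.add s.1 ident, s.2.1 ++ [card],
              (PySem.List.insertBy pvCardLt card s.2.2).take t.toNat)) := by
    funext s card
    simp only [pvInsertSorted, PySem.List.slice_to _ ht]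
  rw [hstep]
  have h0 : (([] : List (List (String × String))).foldl
      (fun best card => PySem.List.insertBy pvCardLt card best) []).take t.toNat
      = ([] : List (List (String × String))) := by simp
  rw [show ((PySem.Set.empty : PySem.Set String), ([] : List (List (String × String))),
        ([] : List (List (String × String))))
      = ((PySem.Set.empty : PySem.Set String), ([] : List (List (String × String))),
        (([] : List (List (String × String))).foldl
          (fun best card => PySem.List.insertBy pvCardLt card best) []).take t.toNat) by rw [h0]]
  rw [fused_inv]
  simp only [deduplicate_cards]
  rw [fold_ins_eq_sorted2, PySem.List.slice_to _ ht]

-- ===== VERDICT (by name: the statement is the Claim_ definition above) =====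
theorem balance_categories_spec : Claim_equal_balance_categories := by
  intro all_cards targets _ hpre
  unfold Spec_balance_categories balance_categories balance_categories_alt
  congr 1
  apply PySem.List.foldl_congr_mem
  intro balanced ct hct
  have ht : 0 ≤ ct.2 := hpre.2.2.2.1 ct hct
  have h := category_eq ((List.lookup ct.1 all_cards).getD []) ct.2 ht
  simp only at h ⊢
  by_cases hlen : ((deduplicate_cards ((List.lookup ct.1 all_cards).getD [])).length : Int) > ct.2
  · simp only [hlen, if_pos] at h ⊢
    rw [← h]
  · simp only [hlen, ite_false] at h ⊢
    rw [← h]
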